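-- pv_equiv track=rewrite | github.com/svjack/ConsisID | util/dataloader.py | get_frame_indices_adjusted_for_face
-- ===== SOURCE A (Python) =====
-- def get_frame_indices_adjusted_for_face(valid_frames, n_frames):
--     valid_length = len(valid_frames)
--     if valid_length >= n_frames:
--         return valid_frames[:n_frames]
--
--     additional_frames_needed = n_frames - valid_length
--     repeat_indices = []
--
--     for i in range(additional_frames_needed):
--         index_to_repeat = i % valid_length
--         repeat_indices.append(valid_frames[index_to_repeat])
--
--     all_indices = valid_frames + repeat_indices
--     all_indices.sort()
--
--     return all_indices
-- ===== SOURCE B (Python) =====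
-- def get_frame_indices_adjusted_for_face(valid_frames, n_frames):
--     valid_length = len(valid_frames)
--     if valid_length >= n_frames:
--         return valid_frames[:n_frames]
--     q, r = divmod(n_frames - valid_length, valid_length)
--     head = valid_frames[:r]
--     out = []
--     for v in sorted(set(valid_frames)):
--         out += [v] * (valid_frames.count(v) * (q + 1) + head.count(v))
--     return out
-- ===== Notes on version B (the rewrite author's own statement) =====
-- stated objective: alternative
-- what changed: Instead of materialising the n_frames-long padded list by cycling indices and sorting it, B computes each value's total multiplicity arithmetically (divmod of the deficit by the list length), sorts only the distinct values, and emits each one repeated that many times.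
import Mathlib
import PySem

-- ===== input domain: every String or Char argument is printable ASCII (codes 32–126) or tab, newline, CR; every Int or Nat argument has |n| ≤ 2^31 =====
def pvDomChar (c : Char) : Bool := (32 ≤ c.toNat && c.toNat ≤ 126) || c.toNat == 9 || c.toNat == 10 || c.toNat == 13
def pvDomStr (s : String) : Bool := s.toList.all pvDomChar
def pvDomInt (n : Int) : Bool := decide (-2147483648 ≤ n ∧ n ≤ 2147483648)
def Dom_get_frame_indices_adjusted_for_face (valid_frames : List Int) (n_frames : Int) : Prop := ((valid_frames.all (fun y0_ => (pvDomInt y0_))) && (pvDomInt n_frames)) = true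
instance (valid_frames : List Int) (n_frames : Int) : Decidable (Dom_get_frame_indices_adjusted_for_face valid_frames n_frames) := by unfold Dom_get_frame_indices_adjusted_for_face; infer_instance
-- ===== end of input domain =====

-- B replaces "pad by cycling then sort the whole n_frames-long list" with "sort the distinct
-- values once and emit each value with its total multiplicity (a counting expansion)";
-- objective: alternative algorithm (sorts only the distinct values, not the padded list).

-- ===== PORT A =====
def get_frame_indices_adjusted_for_face (valid_frames : List Int) (n_frames : Int) : List Int :=
  let valid_length : Int := valid_frames.length
  if valid_length ≥ n_frames then
    PySem.List.slice valid_frames none (some n_frames)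
  else
    let additional_frames_needed := n_frames - valid_length
    let repeat_indices := (PySem.List.pyRange 0 additional_frames_needed 1).foldl
      (fun acc i => acc ++ [PySem.List.pyGetD valid_frames (PySem.Int.mod i valid_length) 0]) []
    let all_indices := valid_frames ++ repeat_indices
    PySem.List.sorted all_indices (fun x => x) false

-- ===== PORT B =====
def get_frame_indices_adjusted_for_face_alt (valid_frames : List Int) (n_frames : Int) : List Int :=
  let valid_length : Int := valid_frames.length
  if valid_length ≥ n_frames then
    PySem.List.slice valid_frames none (some n_frames)
  else
    let q := PySem.Int.floordiv (n_frames - valid_length) valid_length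
    let r := PySem.Int.mod (n_frames - valid_length) valid_length
    let head := PySem.List.slice valid_frames none (some r)
    (PySem.List.sorted (PySem.Set.ofList valid_frames) (fun x => x) false).foldl
      (fun out v => out ++ PySem.List.pyRepeat [v]
        ((valid_frames.count v : Int) * (q + 1) + (head.count v : Int))) []

-- ===== PRECONDITION & SPEC =====
-- Pre_ excludes only the inputs where A raises (ZeroDivisionError from 'i % 0'):
-- an empty valid_frames together with n_frames > 0.  B raises there too.
def Pre_get_frame_indices_adjusted_for_face (valid_frames : List Int) (n_frames : Int) : Prop :=
  ¬ (valid_frames = [] ∧ (valid_frames.length : Int) < n_frames)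
instance (valid_frames : List Int) (n_frames : Int) : Decidable (Pre_get_frame_indices_adjusted_for_face valid_frames n_frames) := by unfold Pre_get_frame_indices_adjusted_for_face; infer_instance
def pvWitness_get_frame_indices_adjusted_for_face : List Int × Int := ([3, 1, 2, 1], 9)

def Spec_get_frame_indices_adjusted_for_face (valid_frames : List Int) (n_frames : Int) (out : List Int) : Prop := out = get_frame_indices_adjusted_for_face_alt valid_frames n_frames
instance (valid_frames : List Int) (n_frames : Int) (out : List Int) : Decidable (Spec_get_frame_indices_adjusted_for_face valid_frames n_frames out) := by unfold Spec_get_frame_indices_adjusted_for_face; infer_instance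

-- ===== CLAIM (what is proved, stated in full; the proofs are below) =====
def Claim_equal_get_frame_indices_adjusted_for_face : Prop := ∀ (valid_frames : List Int) (n_frames : Int), Dom_get_frame_indices_adjusted_for_face valid_frames n_frames → Pre_get_frame_indices_adjusted_for_face valid_frames n_frames → Spec_get_frame_indices_adjusted_for_face valid_frames n_frames (get_frame_indices_adjusted_for_face valid_frames n_frames)

-- ===== LEMMAS AND PROOFS =====

-- a prefix of xs read off by index
theorem pv_map_range_getD_take (xs : List Int) (N : Nat) (h : N ≤ xs.length) :
    (List.range N).map (fun i => xs.getD i 0) = xs.take N := by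
  apply List.ext_getElem
  · simp [Nat.min_eq_left h]
  · intro i h1 h2
    simp only [List.length_map, List.length_range] at h1
    simp only [List.getElem_map, List.getElem_range, List.getElem_take]
    rw [List.getD_eq_getElem xs 0 (by omega)]

-- cycling through xs by index-mod is q whole copies plus a prefix
theorem pv_map_range_mod (xs : List Int) (hne : xs ≠ []) : ∀ N : Nat,
    (List.range N).map (fun i => xs.getD (i % xs.length) 0) =
      (List.replicate (N / xs.length) xs).flatten ++ xs.take (N % xs.length) := by
  intro N
  induction N using Nat.strong_induction_on with
  | _ N ih =>
    have hL : 0 < xs.length := List.length_pos_iff.mpr hne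
    by_cases hlt : N < xs.length
    · rw [Nat.div_eq_of_lt hlt, Nat.mod_eq_of_lt hlt]
      simp only [List.replicate_zero, List.flatten_nil, List.nil_append]
      rw [← pv_map_range_getD_take xs N (le_of_lt hlt)]
      apply List.map_congr_left
      intro i hi
      simp at hi
      rw [Nat.mod_eq_of_lt (by omega)]
    · push_neg at hlt
      obtain ⟨M, hM⟩ : ∃ M, N = xs.length + M := ⟨N - xs.length, by omega⟩
      subst hM
      rw [List.range_add, List.map_append, List.map_map]
      have h1 : (List.range xs.length).map (fun i => xs.getD (i % xs.length) 0) = xs := by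
        have ht : (List.range xs.length).map (fun i => xs.getD i 0) = xs := by
          rw [pv_map_range_getD_take xs xs.length le_rfl, List.take_length]
        conv_rhs => rw [← ht]
        apply List.map_congr_left
        intro i hi; simp at hi
        rw [Nat.mod_eq_of_lt hi]
      have h2 : ((fun i => xs.getD (i % xs.length) 0) ∘ (fun k => xs.length + k)) =
          fun i => xs.getD (i % xs.length) 0 := by
        funext i; simp [Nat.add_mod_left]
      rw [h1, h2, ih M (by omega)]
      have hdiv : (xs.length + M) / xs.length = M / xs.length + 1 := by
        rw [Nat.add_comm]; exact Nat.add_div_right M hL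
      have hmod : (xs.length + M) % xs.length = M % xs.length := Nat.add_mod_left _ _
      rw [hdiv, hmod, List.replicate_succ, List.flatten_cons, List.append_assoc]

-- count of a value in a flatMap of replicates over a nodup list
theorem pv_count_flatMap_replicate (S : List Int) (hnd : S.Nodup) (n : Int → Nat) (x : Int) :
    (S.flatMap (fun v => List.replicate (n v) v)).count x = if x ∈ S then n x else 0 := by
  induction S with
  | nil => simp
  | cons a t ih =>
    simp only [List.flatMap_cons, List.count_append, List.nodup_cons] at *
    rw [ih hnd.2, List.count_replicate]
    by_cases hxa : x = a
    · subst hxa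
      simp [hnd.1]
    · simp [hxa, Ne.symm hxa]

-- flatMap of replicates over a strictly increasing list is sorted
theorem pv_pairwise_flatMap_replicate (S : List Int) (hp : S.Pairwise (· < ·)) (n : Int → Nat) :
    (S.flatMap (fun v => List.replicate (n v) v)).Pairwise (· ≤ ·) := by
  induction S with
  | nil => simp
  | cons a t ih =>
    simp only [List.flatMap_cons, List.pairwise_cons] at *
    rw [List.pairwise_append]
    refine ⟨List.pairwise_replicate.mpr (Or.inr le_rfl), ih hp.2, ?_⟩
    intro x hx y hy
    rw [List.eq_of_mem_replicate hx]
    obtain ⟨v, hv, hyv⟩ := List.mem_flatMap.mp hy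
    rw [List.eq_of_mem_replicate hyv]
    exact le_of_lt (hp.1 v hv)

theorem pv_count_flatten_replicate (xs : List Int) (q : Nat) (x : Int) :
    (List.replicate q xs).flatten.count x = q * xs.count x := by
  induction q with
  | zero => simp
  | succ k ih => rw [List.replicate_succ, List.flatten_cons, List.count_append, ih]; ring

-- ===== VERDICT (by name: the statement is the Claim_ definition above) =====
theorem get_frame_indices_adjusted_for_face_spec : Claim_equal_get_frame_indices_adjusted_for_face := by
  intro xs n _hdom hpre
  unfold Spec_get_frame_indices_adjusted_for_face
  unfold get_frame_indices_adjusted_for_face get_frame_indices_adjusted_for_face_alt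
  simp only []
  by_cases hge : (xs.length : Int) ≥ n
  · rw [if_pos hge, if_pos hge]
  · rw [if_neg hge, if_neg hge]
    push_neg at hge
    have hne : xs ≠ [] := by
      intro hnil
      exact hpre ⟨hnil, by omega⟩
    have hL : 0 < xs.length := List.length_pos_iff.mpr hne
    -- abbreviations
    set L : Nat := xs.length with hLdef
    obtain ⟨N, hN⟩ : ∃ N : Nat, n - (L : Int) = (N : Nat) := ⟨(n - L).toNat, by omega⟩
    -- A side: the repeat loop is q whole copies of xs plus a prefix
    have hrep : (PySem.List.pyRange 0 (n - (L : Int)) 1).foldl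
        (fun acc i => acc ++ [PySem.List.pyGetD xs (PySem.Int.mod i (L : Int)) 0]) [] =
        (List.replicate (N / L) xs).flatten ++ xs.take (N % L) := by
      rw [PySem.List.foldl_append_singleton_eq_map, List.nil_append, hN,
        PySem.List.pyRange_one 0 (N : Int)]
      have : ((N : Int) - 0).toNat = N := by omega
      rw [this, List.map_map]
      rw [← pv_map_range_mod xs hne N]
      apply List.map_congr_left
      intro i hi
      simp only [Function.comp_apply, zero_add]
      rw [PySem.Int.mod_natCast, PySem.List.pyGetD_natCast]
    rw [hrep]
    -- B side: floordiv/mod are the Nat division, the head slice is a take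
    rw [hN, PySem.Int.floordiv_natCast, PySem.Int.mod_natCast,
      PySem.List.slice_to_natCast]
    rw [PySem.List.foldl_append_eq_flatMap, List.nil_append]
    -- the per-value repeat count as a Nat
    have hcnt : ∀ v : Int, PySem.List.pyRepeat [v]
        ((xs.count v : Int) * (((N / L : Nat) : Int) + 1) + ((xs.take (N % L)).count v : Int)) =
        List.replicate (xs.count v * (N / L + 1) + (xs.take (N % L)).count v) v := by
      intro v
      rw [PySem.List.pyRepeat_singleton]
      have hcast : ((xs.count v : Int) * (((N / L : Nat) : Int) + 1) +
          ((xs.take (N % L)).count v : Int)) =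
          ((xs.count v * (N / L + 1) + (xs.take (N % L)).count v : Nat) : Int) := by
        push_cast
        ring
      rw [hcast, Int.toNat_natCast]
    simp only [hcnt]
    -- now conclude: B's expansion is a ≤-sorted permutation of A's padded list
    set S := PySem.List.sorted (PySem.Set.ofList xs) (fun x => x) false with hS
    set nfun : Int → Nat := fun v => xs.count v * (N / L + 1) + (xs.take (N % L)).count v with hnfun
    have hSlt : S.Pairwise (· < ·) := PySem.List.sorted_ofList_pairwise_lt xs
    have hSnd : S.Nodup := hSlt.imp (fun h => ne_of_lt h)
    have hSmem : ∀ v, v ∈ S ↔ v ∈ xs := by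
      intro v
      rw [hS, PySem.List.mem_sorted]
      exact PySem.Set.mem_ofList xs v
    apply PySem.List.sorted_id_eq_of_perm_of_pairwise
    · -- permutation, by counting each value
      rw [List.perm_iff_count]
      intro x
      rw [pv_count_flatMap_replicate S hSnd nfun x]
      simp only [List.count_append, pv_count_flatten_replicate]
      by_cases hx : x ∈ xs
      · rw [if_pos ((hSmem x).mpr hx), hnfun]
        ring
      · rw [if_neg (fun h => hx ((hSmem x).mp h))]
        have h0 : xs.count x = 0 := List.count_eq_zero.mpr hx
        have h1 : (xs.take (N % L)).count x = 0 :=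
          List.count_eq_zero.mpr (fun h => hx (List.mem_of_mem_take h))
        rw [h0, h1]
        simp
    · exact pv_pairwise_flatMap_replicate S hSlt nfun
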